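-- pv_equiv track=rewrite | github.com/saleed/LeetCode | 723.py | check
-- ===== SOURCE A (Python) =====
-- def check(board):
--     flag = 0
--     mark=[[0 for _ in range(len(board[0]))] for _ in range(len(board))]
--     for i in range(len(board)):
--         for j in range(len(board[0])):
--             if board[i][j]==0:
--                 continue
--             if mark[i][j]==1:
--                 continue
--             if i<0 or j<0 or i>=len(board) or j>=len(board[0]):
--                 return False
--             v=board[i][j]
--             l=i
--             while l>=0 and board[l][j]==v and board[l][j]!=0:
--                 l-=1
--             r=i
--             while r<len(board) and board[r][j]==v and board[r][j]!=0:
--                 r+=1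
--             if r-l-1>=3:
--                 flag=1
--                 for s in range(l+1,r):
--                     mark[s][j]=1
--             u=j
--             while u<len(board[0]) and board[i][u]==v and board[i][u]!=0:
--                 u+=1
--             d=j
--             while d>=0 and board[i][d]==v  and board[i][d]!=0:
--                 d-=1
--             if u-d-1>=3:
--                 flag=1
--                 for s in range(d+1,u):
--                     mark[i][s]=1
--     return mark,flag
-- ===== SOURCE B (Python) =====
-- def check(board):
--     n, m = len(board), (len(board[0]) if board else 0)
--
--     def hit_v(i, j, v):
--         return any(0 <= k and k + 2 < n
--                    and board[k][j] == v and board[k + 1][j] == v and board[k + 2][j] == v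
--                    for k in range(i - 2, i + 1))
--
--     def hit_h(i, j, v):
--         return any(0 <= k and k + 2 < m
--                    and board[i][k] == v and board[i][k + 1] == v and board[i][k + 2] == v
--                    for k in range(j - 2, j + 1))
--
--     def hit(i, j):
--         v = board[i][j]
--         return v != 0 and (hit_v(i, j, v) or hit_h(i, j, v))
--
--     mark = [[1 if hit(i, j) else 0 for j in range(m)] for i in range(n)]
--     flag = 1 if any(1 in row for row in mark) else 0
--     return mark, flag
-- ===== Notes on version B (the rewrite author's own statement) =====
-- stated objective: simpler
-- what changed: A mutates a mark grid, extending maximal runs with four while-loops per cell and skipping already-marked cells; B is a pure per-cell test that builds the grid by comprehension, marking a cell iff some length-3 window of equal nonzero values (vertical or horizontal) contains it, with flag = any cell marked.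
import Mathlib
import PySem

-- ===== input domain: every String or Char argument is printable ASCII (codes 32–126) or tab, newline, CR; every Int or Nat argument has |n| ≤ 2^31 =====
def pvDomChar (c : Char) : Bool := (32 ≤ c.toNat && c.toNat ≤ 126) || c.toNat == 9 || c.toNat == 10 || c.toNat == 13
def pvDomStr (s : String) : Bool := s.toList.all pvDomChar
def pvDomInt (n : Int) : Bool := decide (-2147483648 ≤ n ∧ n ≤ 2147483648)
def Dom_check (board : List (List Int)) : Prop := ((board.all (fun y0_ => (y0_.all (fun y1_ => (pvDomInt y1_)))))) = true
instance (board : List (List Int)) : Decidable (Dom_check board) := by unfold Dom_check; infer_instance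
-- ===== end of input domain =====

-- B rewrites A's mutate-and-extend scan as a pure per-cell window test (simpler decomposition); same return value on Pre_.

-- ===== PORT A =====
-- board[k][j]: in both Pythons every read is guarded to be in range (under Pre_), so a total
-- default-0 reader is exact there.
def valI (board : List (List Int)) (k j : Int) : Int :=
  (board.getD k.toNat []).getD j.toNat 0

-- mark[a][b] read / write (indices are nonnegative and in range at every call site)
def get2 (g : List (List Int)) (a b : Int) : Int :=
  (g.getD a.toNat []).getD b.toNat 0

def set2 (g : List (List Int)) (a b : Int) : List (List Int) :=
  g.set a.toNat ((g.getD a.toNat []).set b.toNat 1)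

-- A's four while-loops share one shape: walk down / up while the cell equals v and is nonzero.
def scanDown (f : Int → Int) (v : Int) (l : Int) : Int :=
  if h : 0 ≤ l ∧ f l = v ∧ f l ≠ 0 then scanDown f v (l - 1) else l
termination_by (l + 1).toNat
decreasing_by omega

def scanUp (f : Int → Int) (bound v : Int) (r : Int) : Int :=
  if h : r < bound ∧ f r = v ∧ f r ≠ 0 then scanUp f bound v (r + 1) else r
termination_by (bound - r).toNat
decreasing_by omega

-- for s in range(a,b): mark[s][j]=1
def markCol (g : List (List Int)) (j a b : Int) : List (List Int) :=
  (PySem.List.pyRange a b 1).foldl (fun g s => set2 g s j) g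

-- for s in range(a,b): mark[i][s]=1
def markRow (g : List (List Int)) (i a b : Int) : List (List Int) :=
  (PySem.List.pyRange a b 1).foldl (fun g s => set2 g i s) g

-- one body of A's double loop (the 'if i<0 or j<0 or i>=len(board) or j>=len(board[0]): return False'
-- guard is unreachable, since i ∈ range(len(board)) and j ∈ range(len(board[0])); omitted)
def stepA (board : List (List Int)) (n m : Int) (st : List (List Int) × Int) (i j : Int) :
    List (List Int) × Int :=
  if valI board i j = 0 then st
  else if get2 st.1 i j = 1 then st
  else
    let v := valI board i j
    let l := scanDown (fun k => valI board k j) v i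
    let r := scanUp (fun k => valI board k j) n v i
    let st1 := if 3 ≤ r - l - 1 then (markCol st.1 j (l + 1) r, (1 : Int)) else st
    let u := scanUp (fun k => valI board i k) m v j
    let d := scanDown (fun k => valI board i k) v j
    if 3 ≤ u - d - 1 then (markRow st1.1 i (d + 1) u, (1 : Int)) else st1

def check (board : List (List Int)) : List (List Int) × Int :=
  let n : Int := board.length
  let m : Int := (board.getD 0 []).length
  let mark0 : List (List Int) :=
    (PySem.List.pyRange 0 n 1).map (fun _ => (PySem.List.pyRange 0 m 1).map (fun _ => (0 : Int)))
  (PySem.List.pyRange 0 n 1).foldl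
    (fun st i => (PySem.List.pyRange 0 m 1).foldl (fun st j => stepA board n m st i j) st)
    (mark0, 0)

-- ===== PORT B =====
def hitV (board : List (List Int)) (n i j v : Int) : Bool :=
  (PySem.List.pyRange (i - 2) (i + 1) 1).any fun k =>
    decide (0 ≤ k) && decide (k + 2 < n) &&
      (valI board k j == v) && (valI board (k + 1) j == v) && (valI board (k + 2) j == v)

def hitH (board : List (List Int)) (m i j v : Int) : Bool :=
  (PySem.List.pyRange (j - 2) (j + 1) 1).any fun k =>
    decide (0 ≤ k) && decide (k + 2 < m) &&
      (valI board i k == v) && (valI board i (k + 1) == v) && (valI board i (k + 2) == v)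

def hitB (board : List (List Int)) (n m i j : Int) : Bool :=
  (valI board i j != 0) &&
    (hitV board n i j (valI board i j) || hitH board m i j (valI board i j))

def check_alt (board : List (List Int)) : List (List Int) × Int :=
  let n : Int := board.length
  let m : Int := if board = [] then 0 else (board.getD 0 []).length
  let mark : List (List Int) :=
    (PySem.List.pyRange 0 n 1).map fun i =>
      (PySem.List.pyRange 0 m 1).map fun j => if hitB board n m i j then (1 : Int) else 0
  let flag : Int := if mark.any (fun row => row.contains 1) then 1 else 0
  (mark, flag)

-- ===== PRECONDITION & SPEC =====
-- Pre_ excludes exactly the inputs on which the Python A raises IndexError: ragged boards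
-- with some row shorter than row 0 (board[i][j]).
def Pre_check (board : List (List Int)) : Prop :=
  ∀ row ∈ board, (board.headD []).length ≤ row.length
instance (board : List (List Int)) : Decidable (Pre_check board) := by
  unfold Pre_check; infer_instance

def pvWitness_check : List (List Int) := [[1, 1, 1], [0, 2, 0]]

def Spec_check (board : List (List Int)) (out : List (List Int) × Int) : Prop := out = check_alt board
instance (board : List (List Int)) (out : List (List Int) × Int) : Decidable (Spec_check board out) := by
  unfold Spec_check; infer_instance

-- ===== CLAIM (what is proved, stated in full; the proofs are below) =====
def Claim_equal_check : Prop :=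
  ∀ (board : List (List Int)), Dom_check board → Pre_check board → Spec_check board (check board)

-- ===== LEMMAS AND PROOFS =====

-- shape of the mark grid
def Shape (g : List (List Int)) (n m : Int) : Prop :=
  (g.length : Int) = n ∧ ∀ row ∈ g, (row.length : Int) = m

-- the invariant of A's double loop after all cells (a,b) with a<i ∨ (a=i ∧ b<j) are processed
def MarkInv (board : List (List Int)) (n m : Int) (st : List (List Int) × Int) (i j : Int) : Prop :=
  Shape st.1 n m ∧
  (∀ a b : Int, 0 ≤ a → a < n → 0 ≤ b → b < m → get2 st.1 a b = 0 ∨ get2 st.1 a b = 1) ∧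
  (∀ a b : Int, 0 ≤ a → a < n → 0 ≤ b → b < m → get2 st.1 a b = 1 → hitB board n m a b = true) ∧
  (∀ a b : Int, 0 ≤ a → a < n → 0 ≤ b → b < m → (a < i ∨ (a = i ∧ b < j)) →
      hitB board n m a b = true → get2 st.1 a b = 1) ∧
  (st.2 = 1 ↔ ∃ a b : Int, 0 ≤ a ∧ a < n ∧ 0 ≤ b ∧ b < m ∧ get2 st.1 a b = 1) ∧
  (st.2 = 0 ∨ st.2 = 1)

lemma scanDown_spec (f : Int → Int) (v l : Int) :
    scanDown f v l ≤ l ∧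
    (∀ k, scanDown f v l < k → k ≤ l → f k = v ∧ f k ≠ 0) ∧
    (scanDown f v l < 0 ∨ ¬(f (scanDown f v l) = v ∧ f (scanDown f v l) ≠ 0)) ∧
    (-1 ≤ l → -1 ≤ scanDown f v l) := by
  suffices h : ∀ (fuel : Nat) (l : Int), (l + 1).toNat ≤ fuel →
      scanDown f v l ≤ l ∧
      (∀ k, scanDown f v l < k → k ≤ l → f k = v ∧ f k ≠ 0) ∧
      (scanDown f v l < 0 ∨ ¬(f (scanDown f v l) = v ∧ f (scanDown f v l) ≠ 0)) ∧
      (-1 ≤ l → -1 ≤ scanDown f v l) by exact h _ l le_rfl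
  intro fuel
  induction fuel with
  | zero =>
    intro l hl
    rw [scanDown]
    have hneg : ¬(0 ≤ l ∧ f l = v ∧ f l ≠ 0) := by
      intro ⟨h0, _⟩; omega
    simp only [hneg, dite_false]
    exact ⟨le_rfl, fun k hk1 hk2 => absurd (lt_of_lt_of_le hk1 hk2) (lt_irrefl l),
      by by_cases hl0 : 0 ≤ l
         · exact Or.inr fun hp => hneg ⟨hl0, hp⟩
         · exact Or.inl (by omega), fun h => h⟩
  | succ fuel ih =>
    intro l hl
    rw [scanDown]
    split_ifs with h
    · obtain ⟨h1, h2, h3, h4⟩ := ih (l - 1) (by omega)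
      refine ⟨by omega, ?_, h3, fun _ => h4 (by omega)⟩
      intro k hk1 hk2
      rcases lt_or_eq_of_le hk2 with hk | hk
      · exact h2 k hk1 (by omega)
      · exact hk ▸ ⟨h.2.1, h.2.2⟩
    · refine ⟨le_rfl, fun k hk1 hk2 => absurd (lt_of_lt_of_le hk1 hk2) (lt_irrefl l), ?_, fun h => h⟩
      by_cases hl0 : 0 ≤ l
      · exact Or.inr fun hp => h ⟨hl0, hp⟩
      · exact Or.inl (by omega)

lemma scanUp_spec (f : Int → Int) (bound v r : Int) :
    r ≤ scanUp f bound v r ∧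
    (∀ k, r ≤ k → k < scanUp f bound v r → f k = v ∧ f k ≠ 0) ∧
    (bound ≤ scanUp f bound v r ∨
      ¬(f (scanUp f bound v r) = v ∧ f (scanUp f bound v r) ≠ 0)) ∧
    (r ≤ bound → scanUp f bound v r ≤ bound) := by
  suffices h : ∀ (fuel : Nat) (r : Int), (bound - r).toNat ≤ fuel →
      r ≤ scanUp f bound v r ∧
      (∀ k, r ≤ k → k < scanUp f bound v r → f k = v ∧ f k ≠ 0) ∧
      (bound ≤ scanUp f bound v r ∨
        ¬(f (scanUp f bound v r) = v ∧ f (scanUp f bound v r) ≠ 0)) ∧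
      (r ≤ bound → scanUp f bound v r ≤ bound) by exact h _ r le_rfl
  intro fuel
  induction fuel with
  | zero =>
    intro r hr
    rw [scanUp]
    have hneg : ¬(r < bound ∧ f r = v ∧ f r ≠ 0) := by
      intro ⟨h0, _⟩; omega
    simp only [hneg, dite_false]
    exact ⟨le_rfl, fun k hk1 hk2 => absurd (lt_of_le_of_lt hk1 hk2) (lt_irrefl r),
      by by_cases hr0 : bound ≤ r
         · exact Or.inl hr0
         · exact Or.inr fun hp => hneg ⟨by omega, hp⟩, fun h => h⟩
  | succ fuel ih =>
    intro r hr
    rw [scanUp]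
    split_ifs with h
    · obtain ⟨h1, h2, h3, h4⟩ := ih (r + 1) (by omega)
      refine ⟨by omega, ?_, h3, fun _ => h4 (by omega)⟩
      intro k hk1 hk2
      rcases lt_or_eq_of_le hk1 with hk | hk
      · exact h2 k (by omega) hk2
      · exact hk ▸ ⟨h.2.1, h.2.2⟩
    · refine ⟨le_rfl, fun k hk1 hk2 => absurd (lt_of_le_of_lt hk1 hk2) (lt_irrefl r), ?_, fun h => h⟩
      by_cases hr0 : bound ≤ r
      · exact Or.inl hr0
      · exact Or.inr fun hp => h ⟨by omega, hp⟩

-- if the maximal run through i has length ≥ 3 then every cell s of the run carries a 3-window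
lemma run_all (f : Int → Int) (v : Int) (hv : v ≠ 0) (bound i : Int)
    (h0 : 0 ≤ i) (hib : i ≤ bound) (hiv : f i = v)
    (hrun : 3 ≤ scanUp f bound v i - scanDown f v i - 1)
    (s : Int) (hs1 : scanDown f v i < s) (hs2 : s < scanUp f bound v i) :
    f s = v ∧ ∃ k, s - 2 ≤ k ∧ k ≤ s ∧ 0 ≤ k ∧ k + 2 < bound ∧
      f k = v ∧ f (k + 1) = v ∧ f (k + 2) = v := by
  obtain ⟨hL1, hL2, hL3, hL4⟩ := scanDown_spec f v i
  obtain ⟨hR1, hR2, hR3, hR4⟩ := scanUp_spec f bound v i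
  have hRb : scanUp f bound v i ≤ bound := hR4 hib
  have hLm : -1 ≤ scanDown f v i := hL4 (by omega)
  have hall : ∀ t, scanDown f v i < t → t < scanUp f bound v i → f t = v := by
    intro t h1 h2
    by_cases ht : t ≤ i
    · exact (hL2 t h1 ht).1
    · exact (hR2 t (by omega) h2).1
  refine ⟨hall s hs1 hs2, min s (scanUp f bound v i - 3), by omega, by omega, by omega, by omega,
    ?_, ?_, ?_⟩ <;> exact hall _ (by omega) (by omega)

-- conversely a 3-window containing i forces the maximal run through i to have length ≥ 3
lemma window_run (f : Int → Int) (v : Int) (hv : v ≠ 0) (bound i : Int)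
    (h0 : 0 ≤ i) (hib : i < bound) (hiv : f i = v)
    (k : Int) (hk1 : k ≤ i) (hk2 : i ≤ k + 2) (hk0 : 0 ≤ k) (hkb : k + 2 < bound)
    (w1 : f k = v) (w2 : f (k + 1) = v) (w3 : f (k + 2) = v) :
    3 ≤ scanUp f bound v i - scanDown f v i - 1 := by
  obtain ⟨hL1, hL2, hL3, hL4⟩ := scanDown_spec f v i
  obtain ⟨hR1, hR2, hR3, hR4⟩ := scanUp_spec f bound v i
  have hwin : ∀ t, k ≤ t → t ≤ k + 2 → f t = v := by
    intro t h1 h2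
    have : t = k ∨ t = k + 1 ∨ t = k + 2 := by omega
    rcases this with h | h | h <;> rw [h] <;> assumption
  have hLk : scanDown f v i < k := by
    by_contra hc
    have hfL : f (scanDown f v i) = v := hwin _ (by omega) (by omega)
    rcases hL3 with h | h
    · omega
    · exact h ⟨hfL, by rw [hfL]; exact hv⟩
  have hRk : k + 2 < scanUp f bound v i := by
    by_contra hc
    have hfR : f (scanUp f bound v i) = v := hwin _ (by omega) (by omega)
    rcases hR3 with h | h
    · omega
    · exact h ⟨hfR, by rw [hfR]; exact hv⟩
  omega

lemma scanDown_lt (f : Int → Int) (v i : Int) (h0 : 0 ≤ i) (hiv : f i = v) (hv : v ≠ 0) :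
    scanDown f v i < i := by
  obtain ⟨hL1, hL2, hL3, hL4⟩ := scanDown_spec f v i
  rcases lt_or_eq_of_le hL1 with h | h
  · exact h
  · rcases hL3 with hc | hc
    · omega
    · have hfv : f (scanDown f v i) = v := by rw [h]; exact hiv
      exact absurd ⟨hfv, by rw [hfv]; exact hv⟩ hc

lemma scanUp_gt (f : Int → Int) (bound v i : Int) (hib : i < bound) (hiv : f i = v) (hv : v ≠ 0) :
    i < scanUp f bound v i := by
  obtain ⟨hR1, hR2, hR3, hR4⟩ := scanUp_spec f bound v i
  rcases lt_or_eq_of_le hR1 with h | h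
  · exact h
  · rcases hR3 with hc | hc
    · omega
    · have hfv : f (scanUp f bound v i) = v := by rw [← h]; exact hiv
      exact absurd ⟨hfv, by rw [hfv]; exact hv⟩ hc

lemma hitB_iff (board : List (List Int)) (n m i j : Int) :
    hitB board n m i j = true ↔
      valI board i j ≠ 0 ∧
        ((∃ k, i - 2 ≤ k ∧ k ≤ i ∧ 0 ≤ k ∧ k + 2 < n ∧ valI board k j = valI board i j ∧
            valI board (k + 1) j = valI board i j ∧ valI board (k + 2) j = valI board i j) ∨
         (∃ k, j - 2 ≤ k ∧ k ≤ j ∧ 0 ≤ k ∧ k + 2 < m ∧ valI board i k = valI board i j ∧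
            valI board i (k + 1) = valI board i j ∧ valI board i (k + 2) = valI board i j)) := by
  simp only [hitB, hitV, hitH, Bool.and_eq_true, Bool.or_eq_true, List.any_eq_true,
    PySem.List.mem_pyRange_one, decide_eq_true_eq, beq_iff_eq, bne_iff_ne, ne_eq]
  constructor
  · rintro ⟨hv, hw⟩
    refine ⟨hv, ?_⟩
    rcases hw with ⟨k, ⟨hk1, hk2⟩, ⟨⟨⟨⟨h0, hb⟩, w1⟩, w2⟩, w3⟩⟩ | ⟨k, ⟨hk1, hk2⟩, ⟨⟨⟨⟨h0, hb⟩, w1⟩, w2⟩, w3⟩⟩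
    · exact Or.inl ⟨k, hk1, by omega, h0, hb, w1, w2, w3⟩
    · exact Or.inr ⟨k, hk1, by omega, h0, hb, w1, w2, w3⟩
  · rintro ⟨hv, hw⟩
    refine ⟨hv, ?_⟩
    rcases hw with ⟨k, hk1, hk2, h0, hb, w1, w2, w3⟩ | ⟨k, hk1, hk2, h0, hb, w1, w2, w3⟩
    · exact Or.inl ⟨k, ⟨hk1, by omega⟩, ⟨⟨⟨⟨h0, hb⟩, w1⟩, w2⟩, w3⟩⟩
    · exact Or.inr ⟨k, ⟨hk1, by omega⟩, ⟨⟨⟨⟨h0, hb⟩, w1⟩, w2⟩, w3⟩⟩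

lemma get2_set2 (g : List (List Int)) (n m a b : Int) (hs : Shape g n m)
    (ha : 0 ≤ a) (han : a < n) (hb : 0 ≤ b) (hbm : b < m) (x y : Int)
    (hx : 0 ≤ x) (hy : 0 ≤ y) :
    get2 (set2 g a b) x y = if x = a ∧ y = b then 1 else get2 g x y := by
  obtain ⟨h1, h2⟩ := hs
  have hlen : a.toNat < g.length := by omega
  have hga : g.getD a.toNat [] = g[a.toNat] := by
    simp [List.getD_eq_getElem?_getD, List.getElem?_eq_getElem hlen]
  have hrl : ((g[a.toNat]).length : Int) = m := h2 _ (List.getElem_mem hlen)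
  unfold get2 set2
  by_cases hxa : x = a
  · subst hxa
    have houter : (g.set x.toNat ((g.getD x.toNat []).set b.toNat 1)).getD x.toNat [] =
        (g.getD x.toNat []).set b.toNat 1 := by
      simp [List.getD_eq_getElem?_getD, List.getElem?_set, hlen]
    rw [houter]
    by_cases hyb : y = b
    · subst hyb
      have hbl : y.toNat < (g[x.toNat]).length := by omega
      simp [List.getD_eq_getElem?_getD, List.getElem?_set, List.getElem?_eq_getElem hlen, hbl]
    · have hne : b.toNat ≠ y.toNat := by omega
      simp [List.getD_eq_getElem?_getD, List.getElem?_set, hne, hyb]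
  · have hne : a.toNat ≠ x.toNat := by omega
    have houter : (g.set a.toNat ((g.getD a.toNat []).set b.toNat 1)).getD x.toNat [] =
        g.getD x.toNat [] := by
      simp [List.getD_eq_getElem?_getD, List.getElem?_set, hne]
    rw [houter]
    simp [hxa]

lemma shape_set2 (g : List (List Int)) (n m a b : Int) (hs : Shape g n m)
    (ha : 0 ≤ a) (han : a < n) :
    Shape (set2 g a b) n m := by
  obtain ⟨h1, h2⟩ := hs
  have hlen : a.toNat < g.length := by omega
  refine ⟨by simpa [set2] using h1, ?_⟩
  intro row hrow
  rcases List.mem_or_eq_of_mem_set hrow with h | h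
  · exact h2 row h
  · subst h
    have hga : g.getD a.toNat [] = g[a.toNat] := by
      simp [List.getD_eq_getElem?_getD, List.getElem?_eq_getElem hlen]
    rw [List.length_set, hga]
    exact h2 _ (List.getElem_mem hlen)

lemma markCol_get2 (n m j : Int) (hj : 0 ≤ j) (hjm : j < m) :
    ∀ (b a : Int) (g : List (List Int)), Shape g n m → 0 ≤ a → b ≤ n →
      Shape (markCol g j a b) n m ∧
      ∀ x y : Int, 0 ≤ x → 0 ≤ y →
        get2 (markCol g j a b) x y = if a ≤ x ∧ x < b ∧ y = j then 1 else get2 g x y := by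
  intro b
  suffices h : ∀ (fuel : Nat) (a : Int), (b - a).toNat ≤ fuel →
      ∀ g, Shape g n m → 0 ≤ a → b ≤ n →
        Shape (markCol g j a b) n m ∧
        ∀ x y : Int, 0 ≤ x → 0 ≤ y →
          get2 (markCol g j a b) x y = if a ≤ x ∧ x < b ∧ y = j then 1 else get2 g x y by
    exact fun a g hs ha hb => h _ a le_rfl g hs ha hb
  intro fuel
  induction fuel with
  | zero =>
    intro a hfa g hs ha hb
    have hba : b ≤ a := by omega
    rw [markCol, PySem.List.pyRange_one_eq_nil hba, List.foldl_nil]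
    exact ⟨hs, fun x y hx hy => by rw [if_neg (by omega)]⟩
  | succ fuel ih =>
    intro a hfa g hs ha hb
    by_cases hab : b ≤ a
    · rw [markCol, PySem.List.pyRange_one_eq_nil hab, List.foldl_nil]
      exact ⟨hs, fun x y hx hy => by rw [if_neg (by omega)]⟩
    · rw [markCol, PySem.List.pyRange_one_cons (by omega), List.foldl_cons, ← markCol]
      have hs' : Shape (set2 g a j) n m := shape_set2 g n m a j hs ha (by omega)
      obtain ⟨ihS, ihG⟩ := ih (a + 1) (by omega) (set2 g a j) hs' (by omega) hb
      refine ⟨ihS, ?_⟩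
      intro x y hx hy
      rw [ihG x y hx hy, get2_set2 g n m a j hs ha (by omega) hj hjm x y hx hy]
      split_ifs <;> first | rfl | omega

lemma markRow_get2 (n m i : Int) (hi : 0 ≤ i) (hin : i < n) :
    ∀ (b a : Int) (g : List (List Int)), Shape g n m → 0 ≤ a → b ≤ m →
      Shape (markRow g i a b) n m ∧
      ∀ x y : Int, 0 ≤ x → 0 ≤ y →
        get2 (markRow g i a b) x y = if x = i ∧ a ≤ y ∧ y < b then 1 else get2 g x y := by
  intro b
  suffices h : ∀ (fuel : Nat) (a : Int), (b - a).toNat ≤ fuel →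
      ∀ g, Shape g n m → 0 ≤ a → b ≤ m →
        Shape (markRow g i a b) n m ∧
        ∀ x y : Int, 0 ≤ x → 0 ≤ y →
          get2 (markRow g i a b) x y = if x = i ∧ a ≤ y ∧ y < b then 1 else get2 g x y by
    exact fun a g hs ha hb => h _ a le_rfl g hs ha hb
  intro fuel
  induction fuel with
  | zero =>
    intro a hfa g hs ha hb
    have hba : b ≤ a := by omega
    rw [markRow, PySem.List.pyRange_one_eq_nil hba, List.foldl_nil]
    exact ⟨hs, fun x y hx hy => by rw [if_neg (by omega)]⟩
  | succ fuel ih =>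
    intro a hfa g hs ha hb
    by_cases hab : b ≤ a
    · rw [markRow, PySem.List.pyRange_one_eq_nil hab, List.foldl_nil]
      exact ⟨hs, fun x y hx hy => by rw [if_neg (by omega)]⟩
    · rw [markRow, PySem.List.pyRange_one_cons (by omega), List.foldl_cons, ← markRow]
      have hs' : Shape (set2 g i a) n m := shape_set2 g n m i a hs hi hin
      obtain ⟨ihS, ihG⟩ := ih (a + 1) (by omega) (set2 g i a) hs' (by omega) hb
      refine ⟨ihS, ?_⟩
      intro x y hx hy
      rw [ihG x y hx hy, get2_set2 g n m i a hs hi hin (by omega) (by omega) x y hx hy]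
      split_ifs <;> first | rfl | omega

lemma step_inv (board : List (List Int)) (n m i j : Int)
    (hi : 0 ≤ i) (hin : i < n) (hj : 0 ≤ j) (hjm : j < m)
    (st : List (List Int) × Int) (h : MarkInv board n m st i j) :
    MarkInv board n m (stepA board n m st i j) i (j + 1) := by
  obtain ⟨hS, h01, hSound, hComp, hFlag, hF01⟩ := h
  by_cases hv0 : valI board i j = 0
  · rw [stepA, if_pos hv0]
    refine ⟨hS, h01, hSound, ?_, hFlag, hF01⟩
    intro a b ha han hb hbm hp hhit
    apply hComp a b ha han hb hbm _ hhit
    rcases hp with hlt | ⟨he, hb'⟩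
    · exact Or.inl hlt
    · by_cases hbj : b = j
      · exfalso
        rw [he, hbj, hitB_iff] at hhit
        exact hhit.1 hv0
      · exact Or.inr ⟨he, by omega⟩
  · by_cases hg1 : get2 st.1 i j = 1
    · rw [stepA, if_neg hv0, if_pos hg1]
      refine ⟨hS, h01, hSound, ?_, hFlag, hF01⟩
      intro a b ha han hb hbm hp hhit
      rcases hp with hlt | ⟨he, hb'⟩
      · exact hComp a b ha han hb hbm (Or.inl hlt) hhit
      · by_cases hbj : b = j
        · rw [he, hbj]; exact hg1
        · exact hComp a b ha han hb hbm (Or.inr ⟨he, by omega⟩) hhit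
    · rw [stepA, if_neg hv0, if_neg hg1]
      simp only []
      set v := valI board i j with hvdef
      set cf := fun k => valI board k j with hcf
      set rf := fun k => valI board i k with hrf
      set L := scanDown cf v i with hL
      set R := scanUp cf n v i with hR
      set U := scanUp rf m v j with hU
      set D := scanDown rf v j with hD
      have hvne : v ≠ 0 := by rw [hvdef]; exact hv0
      have hcfi : cf i = v := by rw [hcf, hvdef]
      have hrfj : rf j = v := by rw [hrf, hvdef]
      have hLlt : L < i := by rw [hL]; exact scanDown_lt cf v i hi hcfi hvne
      have hRgt : i < R := by rw [hR]; exact scanUp_gt cf n v i hin hcfi hvne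
      have hDlt : D < j := by rw [hD]; exact scanDown_lt rf v j hj hrfj hvne
      have hUgt : j < U := by rw [hU]; exact scanUp_gt rf m v j hjm hrfj hvne
      have hLm : -1 ≤ L := by rw [hL]; exact (scanDown_spec cf v i).2.2.2 (by omega)
      have hRb : R ≤ n := by rw [hR]; exact (scanUp_spec cf n v i).2.2.2 (le_of_lt hin)
      have hDm : -1 ≤ D := by rw [hD]; exact (scanDown_spec rf v j).2.2.2 (by omega)
      have hUb : U ≤ m := by rw [hU]; exact (scanUp_spec rf m v j).2.2.2 (le_of_lt hjm)
      have hVhit : 3 ≤ R - L - 1 → ∀ s : Int, L < s → s < R → hitB board n m s j = true := by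
        intro hcv s hs1 hs2
        rw [hL] at hs1; rw [hR] at hs2; rw [hL, hR] at hcv
        obtain ⟨hsv, k, hk1, hk2, hk0, hkb, w1, w2, w3⟩ :=
          run_all cf v hvne n i hi (le_of_lt hin) hcfi hcv s hs1 hs2
        have hvs : valI board s j = v := by rw [hcf] at hsv; exact hsv
        rw [hitB_iff]
        refine ⟨by rw [hvs]; exact hvne, Or.inl ⟨k, hk1, hk2, hk0, hkb, ?_, ?_, ?_⟩⟩
        · rw [hvs]; rw [hcf] at w1; exact w1
        · rw [hvs]; rw [hcf] at w2; exact w2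
        · rw [hvs]; rw [hcf] at w3; exact w3
      have hHhit : 3 ≤ U - D - 1 → ∀ s : Int, D < s → s < U → hitB board n m i s = true := by
        intro hch s hs1 hs2
        rw [hD] at hs1; rw [hU] at hs2; rw [hD, hU] at hch
        obtain ⟨hsv, k, hk1, hk2, hk0, hkb, w1, w2, w3⟩ :=
          run_all rf v hvne m j hj (le_of_lt hjm) hrfj hch s hs1 hs2
        have hvs : valI board i s = v := by rw [hrf] at hsv; exact hsv
        rw [hitB_iff]
        refine ⟨by rw [hvs]; exact hvne, Or.inr ⟨k, hk1, hk2, hk0, hkb, ?_, ?_, ?_⟩⟩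
        · rw [hvs]; rw [hrf] at w1; exact w1
        · rw [hvs]; rw [hrf] at w2; exact w2
        · rw [hvs]; rw [hrf] at w3; exact w3
      have hhit_cases : hitB board n m i j = true → (3 ≤ R - L - 1) ∨ (3 ≤ U - D - 1) := by
        intro hh
        rw [hitB_iff] at hh
        rcases hh.2 with ⟨k, hk1, hk2, hk0, hkb, w1, w2, w3⟩ | ⟨k, hk1, hk2, hk0, hkb, w1, w2, w3⟩
        · left; rw [hL, hR]
          exact window_run cf v hvne n i hi hin hcfi k hk2 (by omega) hk0 hkb
            (by rw [hcf, hvdef]; exact w1) (by rw [hcf, hvdef]; exact w2)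
            (by rw [hcf, hvdef]; exact w3)
        · right; rw [hD, hU]
          exact window_run rf v hvne m j hj hjm hrfj k hk2 (by omega) hk0 hkb
            (by rw [hrf, hvdef]; exact w1) (by rw [hrf, hvdef]; exact w2)
            (by rw [hrf, hvdef]; exact w3)
      by_cases hcv : 3 ≤ R - L - 1 <;> by_cases hch : 3 ≤ U - D - 1
      · -- both runs long: vertical then horizontal marking, flag 1
        rw [if_pos hcv, if_pos hch]
        obtain ⟨hshC, hgC⟩ := markCol_get2 n m j hj hjm R (L + 1) st.1 hS (by omega) hRb
        obtain ⟨hshR, hgR⟩ :=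
          markRow_get2 n m i hi hin U (D + 1) (markCol st.1 j (L + 1) R) hshC (by omega) hUb
        refine ⟨hshR, ?_, ?_, ?_, ?_, Or.inr rfl⟩
        · intro a b ha han hb hbm
          rw [hgR a b ha hb, hgC a b ha hb]
          split_ifs
          · exact Or.inr rfl
          · exact Or.inr rfl
          · exact h01 a b ha han hb hbm
        · intro a b ha han hb hbm hmark
          rw [hgR a b ha hb, hgC a b ha hb] at hmark
          split_ifs at hmark with c1 c2
          · obtain ⟨e1, e2, e3⟩ := c1
            rw [e1]; exact hHhit hch b (by omega) e3
          · obtain ⟨e1, e2, e3⟩ := c2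
            rw [e3]; exact hVhit hcv a (by omega) e2
          · exact hSound a b ha han hb hbm hmark
        · intro a b ha han hb hbm hp hhit
          rw [hgR a b ha hb, hgC a b ha hb]
          rcases hp with hlt | ⟨he, hb'⟩
          · have hold : get2 st.1 a b = 1 := hComp a b ha han hb hbm (Or.inl hlt) hhit
            split_ifs <;> first | rfl | exact hold
          · by_cases hbj : b = j
            · rw [he, hbj]
              rw [if_pos ⟨rfl, by omega, hUgt⟩]
            · have hold : get2 st.1 a b = 1 :=
                hComp a b ha han hb hbm (Or.inr ⟨he, by omega⟩) hhit
              split_ifs <;> first | rfl | exact hold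
        · constructor
          · intro _
            refine ⟨i, j, hi, hin, hj, hjm, ?_⟩
            rw [hgR i j hi hj]
            rw [if_pos ⟨rfl, by omega, hUgt⟩]
          · intro _; rfl
      · -- only the vertical run is long
        rw [if_pos hcv, if_neg hch]
        obtain ⟨hshC, hgC⟩ := markCol_get2 n m j hj hjm R (L + 1) st.1 hS (by omega) hRb
        refine ⟨hshC, ?_, ?_, ?_, ?_, Or.inr rfl⟩
        · intro a b ha han hb hbm
          rw [hgC a b ha hb]
          split_ifs
          · exact Or.inr rfl
          · exact h01 a b ha han hb hbm
        · intro a b ha han hb hbm hmark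
          rw [hgC a b ha hb] at hmark
          split_ifs at hmark with c1
          · obtain ⟨e1, e2, e3⟩ := c1
            rw [e3]; exact hVhit hcv a (by omega) e2
          · exact hSound a b ha han hb hbm hmark
        · intro a b ha han hb hbm hp hhit
          rw [hgC a b ha hb]
          rcases hp with hlt | ⟨he, hb'⟩
          · have hold : get2 st.1 a b = 1 := hComp a b ha han hb hbm (Or.inl hlt) hhit
            split_ifs <;> first | rfl | exact hold
          · by_cases hbj : b = j
            · rw [he, hbj]
              rw [if_pos ⟨by omega, hRgt, rfl⟩]
            · have hold : get2 st.1 a b = 1 :=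
                hComp a b ha han hb hbm (Or.inr ⟨he, by omega⟩) hhit
              split_ifs <;> first | rfl | exact hold
        · constructor
          · intro _
            refine ⟨i, j, hi, hin, hj, hjm, ?_⟩
            rw [hgC i j hi hj]
            rw [if_pos ⟨by omega, hRgt, rfl⟩]
          · intro _; rfl
      · -- only the horizontal run is long
        rw [if_neg hcv, if_pos hch]
        obtain ⟨hshR, hgR⟩ := markRow_get2 n m i hi hin U (D + 1) st.1 hS (by omega) hUb
        refine ⟨hshR, ?_, ?_, ?_, ?_, Or.inr rfl⟩
        · intro a b ha han hb hbm
          rw [hgR a b ha hb]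
          split_ifs
          · exact Or.inr rfl
          · exact h01 a b ha han hb hbm
        · intro a b ha han hb hbm hmark
          rw [hgR a b ha hb] at hmark
          split_ifs at hmark with c1
          · obtain ⟨e1, e2, e3⟩ := c1
            rw [e1]; exact hHhit hch b (by omega) e3
          · exact hSound a b ha han hb hbm hmark
        · intro a b ha han hb hbm hp hhit
          rw [hgR a b ha hb]
          rcases hp with hlt | ⟨he, hb'⟩
          · have hold : get2 st.1 a b = 1 := hComp a b ha han hb hbm (Or.inl hlt) hhit
            split_ifs <;> first | rfl | exact hold
          · by_cases hbj : b = j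
            · rw [he, hbj]
              rw [if_pos ⟨rfl, by omega, hUgt⟩]
            · have hold : get2 st.1 a b = 1 :=
                hComp a b ha han hb hbm (Or.inr ⟨he, by omega⟩) hhit
              split_ifs <;> first | rfl | exact hold
        · constructor
          · intro _
            refine ⟨i, j, hi, hin, hj, hjm, ?_⟩
            rw [hgR i j hi hj]
            rw [if_pos ⟨rfl, by omega, hUgt⟩]
          · intro _; rfl
      · -- neither run is long: nothing marked
        rw [if_neg hcv, if_neg hch]
        refine ⟨hS, h01, hSound, ?_, hFlag, hF01⟩
        intro a b ha han hb hbm hp hhit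
        rcases hp with hlt | ⟨he, hb'⟩
        · exact hComp a b ha han hb hbm (Or.inl hlt) hhit
        · by_cases hbj : b = j
          · exfalso
            rw [he, hbj] at hhit
            rcases hhit_cases hhit with hc | hc
            · exact hcv hc
            · exact hch hc
          · exact hComp a b ha han hb hbm (Or.inr ⟨he, by omega⟩) hhit

lemma foldl_pyRange_inv {σ : Type} (g : σ → Int → σ) (I : σ → Int → Prop) (b : Int)
    (hstep : ∀ s a, 0 ≤ a → a < b → I s a → I (g s a) (a + 1)) :
    ∀ (a : Int) (s : σ), 0 ≤ a → a ≤ b → I s a →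
      I ((PySem.List.pyRange a b 1).foldl g s) b := by
  intro a
  suffices h : ∀ (fuel : Nat) (a : Int), (b - a).toNat ≤ fuel →
      ∀ s, 0 ≤ a → a ≤ b → I s a → I ((PySem.List.pyRange a b 1).foldl g s) b by
    exact fun s ha hab hi => h _ a le_rfl s ha hab hi
  intro fuel
  induction fuel with
  | zero =>
    intro a hfa s ha hab hi
    have hba : a = b := by omega
    subst hba
    rw [PySem.List.pyRange_one_eq_nil le_rfl, List.foldl_nil]
    exact hi
  | succ fuel ih =>
    intro a hfa s ha hab hi
    rcases lt_or_eq_of_le hab with h | h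
    · rw [PySem.List.pyRange_one_cons h, List.foldl_cons]
      exact ih (a + 1) (by omega) (g s a) (by omega) (by omega) (hstep s a ha h hi)
    · subst h
      rw [PySem.List.pyRange_one_eq_nil le_rfl, List.foldl_nil]
      exact hi

lemma map_const0_getD {α : Type} (l : List α) (k : Nat) :
    ((l.map (fun _ => (0 : Int))).getD k 0) = 0 := by
  rw [List.getD_eq_getElem?_getD, List.getElem?_map]
  cases l[k]? <;> simp

lemma init_inv (board : List (List Int)) (n m : Int) (hn0 : 0 ≤ n) (hm0 : 0 ≤ m) :
    MarkInv board n m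
      ((PySem.List.pyRange 0 n 1).map
        (fun _ => (PySem.List.pyRange 0 m 1).map (fun _ => (0 : Int))), 0) 0 0 := by
  have hz : ∀ a b : Int,
      get2 ((PySem.List.pyRange 0 n 1).map
        (fun _ => (PySem.List.pyRange 0 m 1).map (fun _ => (0 : Int)))) a b = 0 := by
    intro a b
    unfold get2
    rcases Nat.lt_or_ge a.toNat
        ((PySem.List.pyRange 0 n 1).map
          (fun _ => (PySem.List.pyRange 0 m 1).map (fun _ => (0 : Int)))).length with hlt | hge
    · have houter : ((PySem.List.pyRange 0 n 1).map
          (fun _ => (PySem.List.pyRange 0 m 1).map (fun _ => (0 : Int)))).getD a.toNat [] =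
          ((PySem.List.pyRange 0 n 1).map
            (fun _ => (PySem.List.pyRange 0 m 1).map (fun _ => (0 : Int))))[a.toNat] := by
        rw [List.getD_eq_getElem?_getD, List.getElem?_eq_getElem hlt]
        rfl
      rw [houter]
      have hmem := List.getElem_mem hlt
      obtain ⟨x, hx, he⟩ := List.mem_map.1 hmem
      rw [← he]
      exact map_const0_getD _ _
    · have houter : ((PySem.List.pyRange 0 n 1).map
          (fun _ => (PySem.List.pyRange 0 m 1).map (fun _ => (0 : Int)))).getD a.toNat [] =
          ([] : List Int) := by
        rw [List.getD_eq_getElem?_getD, List.getElem?_eq_none (by omega)]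
        rfl
      rw [houter]
      simp
  refine ⟨⟨?_, ?_⟩, ?_, ?_, ?_, ?_, Or.inl rfl⟩
  · simp only [List.length_map, PySem.List.length_pyRange_one]
    omega
  · intro row hrow
    obtain ⟨x, hx, he⟩ := List.mem_map.1 hrow
    rw [← he]
    simp only [List.length_map, PySem.List.length_pyRange_one]
    omega
  · intro a b ha han hb hbm
    exact Or.inl (hz a b)
  · intro a b ha han hb hbm hmark
    exact absurd (hmark ▸ hz a b) (by norm_num)
  · intro a b ha han hb hbm hp hhit
    exact absurd hp (by omega)
  · constructor
    · intro h; exact absurd h (by norm_num)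
    · rintro ⟨a, b, ha, han, hb, hbm, h1⟩
      exact absurd (h1 ▸ hz a b) (by norm_num)

lemma inv_advance (board : List (List Int)) (n m : Int) (st : List (List Int) × Int) (i : Int)
    (h : MarkInv board n m st i m) : MarkInv board n m st (i + 1) 0 := by
  obtain ⟨a1, a2, a3, a4, a5, a6⟩ := h
  refine ⟨a1, a2, a3, ?_, a5, a6⟩
  intro a b ha han hb hbm hp hhit
  exact a4 a b ha han hb hbm (by omega) hhit

-- ===== VERDICT (by name: the statement is the Claim_ definition above) =====
theorem check_spec : Claim_equal_check := by
  unfold Claim_equal_check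
  intro board _ _
  unfold Spec_check check check_alt
  simp only []
  have hmB : (if board = [] then (0 : Int) else ((board.getD 0 []).length : Int)) =
      ((board.getD 0 []).length : Int) := by
    cases board <;> simp
  rw [hmB]
  set n := ((board.length : Nat) : Int) with hn
  set m := (((board.getD 0 []).length : Nat) : Int) with hm
  have hn0 : 0 ≤ n := by rw [hn]; exact Int.natCast_nonneg _
  have hm0 : 0 ≤ m := by rw [hm]; exact Int.natCast_nonneg _
  have hinv : MarkInv board n m
      ((PySem.List.pyRange 0 n 1).foldl
        (fun st i => (PySem.List.pyRange 0 m 1).foldl (fun st j => stepA board n m st i j) st)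
        ((PySem.List.pyRange 0 n 1).map
          (fun _ => (PySem.List.pyRange 0 m 1).map (fun _ => (0 : Int))), 0)) n 0 := by
    apply foldl_pyRange_inv _ (fun st i => MarkInv board n m st i 0) n ?_ 0 _ le_rfl hn0
        (init_inv board n m hn0 hm0)
    intro st a ha hab hI
    apply inv_advance
    exact foldl_pyRange_inv _ (fun st j => MarkInv board n m st a j) m
      (fun s b hb hbm hJ => step_inv board n m a b ha hab hb hbm s hJ) 0 st le_rfl hm0 hI
  set stF := (PySem.List.pyRange 0 n 1).foldl
      (fun st i => (PySem.List.pyRange 0 m 1).foldl (fun st j => stepA board n m st i j) st)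
      ((PySem.List.pyRange 0 n 1).map
        (fun _ => (PySem.List.pyRange 0 m 1).map (fun _ => (0 : Int))), 0) with hstF
  obtain ⟨⟨hlen, hrows⟩, h01, hSound, hComp, hFlag, hF01⟩ := hinv
  have hhit_entry : ∀ a b : Int, 0 ≤ a → a < n → 0 ≤ b → b < m →
      get2 stF.1 a b = if hitB board n m a b then 1 else 0 := by
    intro a b ha han hb hbm
    by_cases hh : hitB board n m a b = true
    · rw [if_pos hh]
      exact hComp a b ha han hb hbm (Or.inl han) hh
    · rw [if_neg hh]
      rcases h01 a b ha han hb hbm with h0 | h1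
      · exact h0
      · exact absurd (hSound a b ha han hb hbm h1) hh
  have h1 : stF.1 = (PySem.List.pyRange 0 n 1).map
      (fun i => (PySem.List.pyRange 0 m 1).map
        (fun j => if hitB board n m i j then (1 : Int) else 0)) := by
    apply List.ext_getElem?
    intro k
    by_cases hk : k < stF.1.length
    · have hkn : (k : Int) < n := by omega
      have hkMA : k < ((PySem.List.pyRange 0 n 1).map
          (fun i => (PySem.List.pyRange 0 m 1).map
            (fun j => if hitB board n m i j then (1 : Int) else 0))).length := by
        simp only [List.length_map, PySem.List.length_pyRange_one]
        omega
      rw [List.getElem?_eq_getElem hk, List.getElem?_eq_getElem hkMA]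
      simp only [List.getElem_map, PySem.List.getElem_pyRange_one, zero_add]
      congr 1
      have hrowlen : stF.1[k].length = m.toNat := by
        have := hrows _ (List.getElem_mem hk)
        omega
      apply List.ext_getElem?
      intro l
      by_cases hl : l < stF.1[k].length
      · have hlm : (l : Int) < m := by omega
        have hlMA : l < ((PySem.List.pyRange 0 m 1).map
            (fun j => if hitB board n m (k : Int) j then (1 : Int) else 0)).length := by
          simp only [List.length_map, PySem.List.length_pyRange_one]
          omega
        rw [List.getElem?_eq_getElem hl, List.getElem?_eq_getElem hlMA]
        simp only [List.getElem_map, PySem.List.getElem_pyRange_one, zero_add]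
        have router : stF.1.getD k [] = stF.1[k] := by
          rw [List.getD_eq_getElem?_getD, List.getElem?_eq_getElem hk]
          rfl
        have hinner : (stF.1[k]).getD l 0 = stF.1[k][l] := by
          rw [List.getD_eq_getElem?_getD, List.getElem?_eq_getElem hl]
          rfl
        have hgv : get2 stF.1 (k : Int) (l : Int) = stF.1[k][l] := by
          unfold get2
          rw [Int.toNat_natCast, Int.toNat_natCast, router, hinner]
        rw [← hgv,
          hhit_entry (k : Int) (l : Int) (Int.natCast_nonneg _) hkn (Int.natCast_nonneg _) hlm]
      · rw [List.getElem?_eq_none (by omega), List.getElem?_eq_none (by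
          simp only [List.length_map, PySem.List.length_pyRange_one]
          omega)]
    · rw [List.getElem?_eq_none (by omega), List.getElem?_eq_none (by
        simp only [List.length_map, PySem.List.length_pyRange_one]
        omega)]
  have hany : (((PySem.List.pyRange 0 n 1).map
      (fun i => (PySem.List.pyRange 0 m 1).map
        (fun j => if hitB board n m i j then (1 : Int) else 0))).any
          fun row => row.contains 1) = true ↔
      ∃ a b : Int, 0 ≤ a ∧ a < n ∧ 0 ≤ b ∧ b < m ∧ hitB board n m a b = true := by
    constructor
    · intro hx
      obtain ⟨row, hrow, hc⟩ := List.any_eq_true.1 hx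
      obtain ⟨a, ha, he⟩ := List.mem_map.1 hrow
      rw [← he] at hc
      have hmem : (1 : Int) ∈ (PySem.List.pyRange 0 m 1).map
          (fun j => if hitB board n m a j then (1 : Int) else 0) :=
        List.contains_iff_mem.1 hc
      obtain ⟨b, hb, hval⟩ := List.mem_map.1 hmem
      rw [PySem.List.mem_pyRange_one] at ha hb
      by_cases hh : hitB board n m a b = true
      · exact ⟨a, b, ha.1, ha.2, hb.1, hb.2, hh⟩
      · rw [if_neg hh] at hval
        exact absurd hval (by norm_num)
    · rintro ⟨a, b, ha1, ha2, hb1, hb2, hh⟩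
      apply List.any_eq_true.2
      refine ⟨(PySem.List.pyRange 0 m 1).map
        (fun j => if hitB board n m a j then (1 : Int) else 0), ?_, ?_⟩
      · exact List.mem_map.2 ⟨a, PySem.List.mem_pyRange_one.2 ⟨ha1, ha2⟩, rfl⟩
      · exact List.contains_iff_mem.2
          (List.mem_map.2 ⟨b, PySem.List.mem_pyRange_one.2 ⟨hb1, hb2⟩, by rw [if_pos hh]⟩)
  have h2 : stF.2 = if (((PySem.List.pyRange 0 n 1).map
      (fun i => (PySem.List.pyRange 0 m 1).map
        (fun j => if hitB board n m i j then (1 : Int) else 0))).any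
          fun row => row.contains 1) then (1 : Int) else 0 := by
    rcases hF01 with h0 | h1f
    · rw [h0, if_neg]
      intro habs
      obtain ⟨a, b, ha1, ha2, hb1, hb2, hh⟩ := hany.1 habs
      have := hFlag.2 ⟨a, b, ha1, ha2, hb1, hb2, hComp a b ha1 ha2 hb1 hb2 (Or.inl ha2) hh⟩
      omega
    · rw [h1f, if_pos]
      obtain ⟨a, b, ha1, ha2, hb1, hb2, hmk⟩ := hFlag.1 h1f
      exact hany.2 ⟨a, b, ha1, ha2, hb1, hb2, hSound a b ha1 ha2 hb1 hb2 hmk⟩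
  rw [Prod.ext_iff]
  exact ⟨h1, h2⟩
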